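-- pv_equiv track=rewrite | github.com/realBruno/Fluxo | src/client/peer.py | process_bitfield
-- ===== SOURCE A (Python) =====
-- def process_bitfield(payload):
--     piece_index = 0
--     indexes = set()
--     for byte in payload:
--         for bit_position in range(7, -1, -1):
--             if byte & (1 << bit_position):
--                 indexes.add(piece_index)
--             piece_index += 1
--     return indexes
-- ===== SOURCE B (Python) =====
-- def process_bitfield(payload):
--     indexes = set()
--     base = 0
--     for byte in payload:
--         b = byte & 0xFF
--         while b:
--             pos = b.bit_length() - 1
--             indexes.add(base + (7 - pos))
--             b ^= 1 << pos
--         base += 8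
--     return indexes
-- ===== Notes on version B (the rewrite author's own statement) =====
-- stated objective: alternative
-- what changed: Instead of scanning all 8 bit positions of every byte with a nested fixed-range loop, B masks the byte to its low 8 bits and runs a data-driven while-loop that visits only the set bits, repeatedly stripping the most significant bit via b ^= 1 << (b.bit_length()-1) and emitting base + (7 - pos).
import Mathlib
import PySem

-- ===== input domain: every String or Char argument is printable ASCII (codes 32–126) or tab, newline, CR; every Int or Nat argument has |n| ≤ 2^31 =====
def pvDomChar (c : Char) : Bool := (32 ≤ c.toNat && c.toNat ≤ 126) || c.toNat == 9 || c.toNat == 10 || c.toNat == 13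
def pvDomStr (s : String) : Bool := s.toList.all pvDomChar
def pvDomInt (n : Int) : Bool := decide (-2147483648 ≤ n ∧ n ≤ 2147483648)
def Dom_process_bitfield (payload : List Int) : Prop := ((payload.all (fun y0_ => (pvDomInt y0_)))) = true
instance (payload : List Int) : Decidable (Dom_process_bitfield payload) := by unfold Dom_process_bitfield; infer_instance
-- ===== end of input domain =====

-- B collects the set-bit indexes byte by byte, looping only over the SET bits of each byte
-- (strip the top bit with b ^= 1 << (b.bit_length()-1)) instead of scanning all 8 positions.

-- ===== PORT A =====
-- literal transliteration of A: for each byte, scan bit positions 7..0, add piece_index when the bit is set.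
-- bit_position.toNat is exact: pyRange 7 (-1) (-1) yields only nonnegative positions.
def process_bitfield (payload : List Int) : List Int :=
  (payload.foldl (fun st byte =>
    (PySem.List.pyRange 7 (-1) (-1)).foldl (fun st2 bit_position =>
      (st2.1 + 1,
       if PySem.Int.band byte (1 <<< bit_position.toNat) ≠ 0 then PySem.Set.add st2.2 st2.1 else st2.2))
      st)
    ((0 : Int), (PySem.Set.empty : PySem.Set Int))).2

-- ===== PORT B =====
-- the while-loop of Source B; fuel 8 is a totality guard only: b = byte & 255 < 256 has at most
-- 8 set bits and each iteration clears one, so the loop never runs more than 8 times.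
-- pos : Nat is exact: in Python pos = b.bit_length() - 1 ≥ 0 since the loop runs only while b ≠ 0 (b > 0).
def pbWhile : Nat → Int → Int → PySem.Set Int → PySem.Set Int
  | 0, _, _, indexes => indexes
  | fuel + 1, b, base, indexes =>
    if b ≠ 0 then
      pbWhile fuel (PySem.Int.bxor b (1 <<< (PySem.Int.bitLength b - 1))) base
        (PySem.Set.add indexes (base + (7 - ((PySem.Int.bitLength b - 1 : Nat) : Int))))
    else indexes

def process_bitfield_alt (payload : List Int) : List Int :=
  (payload.foldl (fun st byte =>
    (st.1 + 8, pbWhile 8 (PySem.Int.band byte 255) st.1 st.2))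
    ((0 : Int), (PySem.Set.empty : PySem.Set Int))).2

-- ===== PRECONDITION & SPEC =====
def Spec_process_bitfield (payload : List Int) (out : List Int) : Prop := out = process_bitfield_alt payload
instance (payload : List Int) (out : List Int) : Decidable (Spec_process_bitfield payload out) := by unfold Spec_process_bitfield; infer_instance

-- ===== CLAIM (what is proved, stated in full; the proofs are below) =====
def Claim_equal_process_bitfield : Prop := ∀ (payload : List Int), Dom_process_bitfield payload → Spec_process_bitfield payload (process_bitfield payload)

-- ===== LEMMAS AND PROOFS =====

-- running offsets (from k) of the positions p in ps whose bit is set in byte, in ps-order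
def bitsOf (byte : Int) : List Int → Int → List Int
  | [], _ => []
  | p :: ps, k =>
    (if PySem.Int.band byte (1 <<< p.toNat) ≠ 0 then [k] else []) ++ bitsOf byte ps (k + 1)

-- offsets 0..7 (MSB first) of the set bits of b, as A's inner loop meets them
def emitA0 (b : Int) : List Int := bitsOf b [7, 6, 5, 4, 3, 2, 1, 0] 0

-- offsets of the set bits of b, as B's while-loop meets them
def emitB : Nat → Int → List Int
  | 0, _ => []
  | fuel + 1, b =>
    if b ≠ 0 then
      (7 - ((PySem.Int.bitLength b - 1 : Nat) : Int)) ::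
        emitB fuel (PySem.Int.bxor b (1 <<< (PySem.Int.bitLength b - 1)))
    else []

lemma pbWhile_eq_fold (fuel : Nat) (b base : Int) (s : PySem.Set Int) :
    pbWhile fuel b base s = (emitB fuel b).foldl (fun s i => PySem.Set.add s (base + i)) s := by
  induction fuel generalizing b s with
  | zero => rfl
  | succ n ih =>
    simp only [pbWhile, emitB]
    split
    · simp [ih]
    · rfl

-- A's inner loop characterised: piece_index advances by one per position, and the
-- indexes added are i0 + (running offset of the positions with a set bit)
lemma innerA_general (byte i0 : Int) (ps : List Int) (k : Int) (s : PySem.Set Int) :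
    ps.foldl (fun st2 bit_position =>
      (st2.1 + 1,
       if PySem.Int.band byte (1 <<< bit_position.toNat) ≠ 0 then PySem.Set.add st2.2 st2.1 else st2.2))
      (i0 + k, s)
    = (i0 + k + ps.length, (bitsOf byte ps k).foldl (fun s j => PySem.Set.add s (i0 + j)) s) := by
  induction ps generalizing k s with
  | nil => simp [bitsOf]
  | cons p ps ih =>
    simp only [List.foldl_cons, bitsOf, List.foldl_append]
    by_cases hc : PySem.Int.band byte (1 <<< p.toNat) ≠ 0
    · rw [if_pos hc, if_pos hc]
      rw [show i0 + k + 1 = i0 + (k + 1) by ring]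
      rw [ih (k + 1) (PySem.Set.add s (i0 + k))]
      simp only [List.foldl_cons, List.foldl_nil, List.length_cons, Prod.mk.injEq]
      refine ⟨by push_cast; ring, trivial⟩
    · rw [if_neg hc, if_neg hc]
      rw [show i0 + k + 1 = i0 + (k + 1) by ring]
      rw [ih (k + 1) s]
      simp only [List.foldl_nil, List.length_cons, Prod.mk.injEq]
      refine ⟨by push_cast; ring, trivial⟩

lemma innerA_eq_fold (byte i0 : Int) (s : PySem.Set Int) :
    (PySem.List.pyRange 7 (-1) (-1)).foldl (fun st2 bit_position =>
      (st2.1 + 1,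
       if PySem.Int.band byte (1 <<< bit_position.toNat) ≠ 0 then PySem.Set.add st2.2 st2.1 else st2.2))
      (i0, s)
    = (i0 + 8, (emitA0 byte).foldl (fun s j => PySem.Set.add s (i0 + j)) s) := by
  rw [show PySem.List.pyRange 7 (-1) (-1) = [7, 6, 5, 4, 3, 2, 1, 0] from by decide]
  have := innerA_general byte i0 [7, 6, 5, 4, 3, 2, 1, 0] 0 s
  rw [show i0 + (0 : Int) = i0 by ring] at this
  rw [this]
  norm_num [emitA0]

-- a low bit test depends only on the low 8 bits (Nat level)
lemma nat_and_low (n p : Nat) (hp : p < 8) : n &&& (1 <<< p) = (n % 256) &&& (1 <<< p) := by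
  apply Nat.eq_of_testBit_eq
  intro i
  by_cases hip : i = p
  · subst hip
    conv_rhs => rw [show (256 : Nat) = 2 ^ 8 from rfl]
    rw [Nat.testBit_and, Nat.testBit_and, Nat.testBit_mod_two_pow]
    simp [hp]
  · have hz : (1 <<< p).testBit i = false := by
      simp only [Nat.shiftLeft_eq, one_mul, Nat.testBit_two_pow]
      exact decide_eq_false (Ne.symm hip)
    simp [Nat.testBit_and, hz]

set_option maxRecDepth 8192 in
lemma sub_and_compl (x p : Nat) (hx : x < 256) (hp : p < 8) :
    (1 <<< p) - (x &&& (1 <<< p)) = (255 - x) &&& (1 <<< p) := by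
  revert hp; revert p; revert hx; revert x
  decide

lemma band255_nonneg (a : Int) : 0 ≤ PySem.Int.band a 255 := by
  unfold PySem.Int.band
  split_ifs <;> omega

lemma band255_lt (a : Int) : PySem.Int.band a 255 < 256 := by
  unfold PySem.Int.band
  split_ifs with h1 h2 h2
  · have := Nat.and_le_right (n := a.toNat) (m := (255 : Int).toNat)
    omega
  · omega
  · have : (255 : Int).toNat - ((255 : Int).toNat &&& (-a - 1).toNat) ≤ 255 := Nat.sub_le _ _
    omega
  · omega

lemma band255_of_nonneg (a : Int) (ha : 0 ≤ a) :
    PySem.Int.band a 255 = ((a.toNat % 256 : Nat) : Int) := by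
  rw [PySem.Int.band_of_nonneg ha (by omega)]
  rw [show ((255 : Int).toNat) = 2 ^ 8 - 1 from rfl, Nat.and_two_pow_sub_one_eq_mod]

lemma band255_of_neg (a : Int) (ha : ¬ 0 ≤ a) :
    PySem.Int.band a 255 = ((255 - (-a - 1).toNat % 256 : Nat) : Int) := by
  unfold PySem.Int.band
  rw [if_neg ha, if_pos (by omega : (0 : Int) ≤ 255)]
  rw [show ((255 : Int).toNat) = 255 from rfl, Nat.and_comm,
      show (255 : Nat) = 2 ^ 8 - 1 from rfl, Nat.and_two_pow_sub_one_eq_mod]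

-- a bit test at position p < 8 is unchanged by masking with 255 first
lemma band_mask (p : Nat) (hp : p < 8) (a : Int) :
    PySem.Int.band a ((1 <<< p : Nat) : Int) = PySem.Int.band (PySem.Int.band a 255) ((1 <<< p : Nat) : Int) := by
  have hP : (0 : Int) ≤ ((1 <<< p : Nat) : Int) := by positivity
  by_cases ha : 0 ≤ a
  · rw [PySem.Int.band_of_nonneg ha hP,
        PySem.Int.band_of_nonneg (band255_nonneg a) hP,
        band255_of_nonneg a ha]
    rw [Int.toNat_natCast, Int.toNat_natCast]
    exact_mod_cast nat_and_low a.toNat p hp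
  · have hstep : PySem.Int.band a ((1 <<< p : Nat) : Int) =
        (((1 <<< p) - ((1 <<< p) &&& (-a - 1).toNat) : Nat) : Int) := by
      unfold PySem.Int.band
      rw [if_neg ha, if_pos hP, Int.toNat_natCast]
    rw [hstep, band255_of_neg a ha, PySem.Int.band_of_nonneg (by positivity) hP,
        Int.toNat_natCast, Int.toNat_natCast]
    congr 1
    rw [Nat.and_comm ((1 : Nat) <<< p), nat_and_low _ p hp]
    exact sub_and_compl _ p (Nat.mod_lt _ (by omega)) hp

lemma bitsOf_congr (a b : Int)
    (h : ∀ p ∈ [(7 : Int), 6, 5, 4, 3, 2, 1, 0],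
      (PySem.Int.band a (1 <<< p.toNat) ≠ 0 ↔ PySem.Int.band b (1 <<< p.toNat) ≠ 0)) (k : Int) :
    bitsOf a [7, 6, 5, 4, 3, 2, 1, 0] k = bitsOf b [7, 6, 5, 4, 3, 2, 1, 0] k := by
  simp only [bitsOf]
  rw [if_congr (h 7 (by simp)) rfl rfl, if_congr (h 6 (by simp)) rfl rfl,
      if_congr (h 5 (by simp)) rfl rfl, if_congr (h 4 (by simp)) rfl rfl,
      if_congr (h 3 (by simp)) rfl rfl, if_congr (h 2 (by simp)) rfl rfl,
      if_congr (h 1 (by simp)) rfl rfl, if_congr (h 0 (by simp)) rfl rfl]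

lemma emitA0_mask (b : Int) : emitA0 b = emitA0 (PySem.Int.band b 255) := by
  unfold emitA0
  apply bitsOf_congr
  intro p hp
  have hlt : p.toNat < 8 := by fin_cases hp <;> decide
  have hcast : (1 <<< p.toNat : Int) = ((1 <<< p.toNat : Nat) : Int) := rfl
  rw [hcast, band_mask p.toNat hlt b]

set_option maxRecDepth 8192 in
lemma emitA0_eq_emitB_small : ∀ n : Nat, n < 256 → emitA0 ((n : Nat) : Int) = emitB 8 ((n : Nat) : Int) := by
  decide

lemma emitA0_eq_emitB (b : Int) : emitA0 b = emitB 8 (PySem.Int.band b 255) := by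
  rw [emitA0_mask]
  have h0 := band255_nonneg b
  have h1 := band255_lt b
  have h2 : PySem.Int.band b 255 = (((PySem.Int.band b 255).toNat : Nat) : Int) :=
    (Int.toNat_of_nonneg h0).symm
  rw [h2]
  exact emitA0_eq_emitB_small (PySem.Int.band b 255).toNat (by omega)

-- the two outer folds agree from any common state
lemma outer_eq (payload : List Int) (i0 : Int) (s : PySem.Set Int) :
    payload.foldl (fun st byte =>
      (PySem.List.pyRange 7 (-1) (-1)).foldl (fun st2 bit_position =>
        (st2.1 + 1,
         if PySem.Int.band byte (1 <<< bit_position.toNat) ≠ 0 then PySem.Set.add st2.2 st2.1 else st2.2))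
        st) (i0, s)
    = payload.foldl (fun st byte =>
        (st.1 + 8, pbWhile 8 (PySem.Int.band byte 255) st.1 st.2)) (i0, s) := by
  induction payload generalizing i0 s with
  | nil => rfl
  | cons byte rest ih =>
    simp only [List.foldl]
    rw [innerA_eq_fold, pbWhile_eq_fold, ← emitA0_eq_emitB]
    exact ih _ _

-- ===== VERDICT (by name: the statement is the Claim_ definition above) =====
theorem process_bitfield_spec : Claim_equal_process_bitfield := by
  intro payload _
  unfold Spec_process_bitfield process_bitfield process_bitfield_alt
  rw [outer_eq]
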